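-- pv_equiv track=rewrite | github.com/benjaminbloch/vl-client-map | scripts/generate_outbound_lists.py | pick_decision_maker
-- ===== SOURCE A (Python) =====
-- TITLE_KEYWORDS = [
--     "Fleet Manager", "Director of Fleet", "Fleet Operations Manager", "Head of Fleet",
--     "VP Fleet", "Director of Fleet Operations", "Procurement Manager", "Purchasing Manager",
--     "Operations Manager", "Director of Operations", "Logistics Manager", "Director of Logistics",
--     "Maintenance Manager", "Fleet Maintenance Manager", "Marketing Manager", "Director of Marketing"
-- ]
--
-- def pick_decision_maker(people):
--     if not people:
--         return None
--     for kw in TITLE_KEYWORDS: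
--         for p in people:
--             title = (p.get("title") or "").lower()
--             if kw.lower() in title:
--                 return p
--     for p in people:
--         title = (p.get("title") or "").lower()
--         if any(x in title for x in ("director","vp","vice","head","manager")):
--             return p
--     return people[0]
-- ===== SOURCE B (Python) =====
-- TITLE_KEYWORDS = [
--     "Fleet Manager", "Director of Fleet", "Fleet Operations Manager", "Head of Fleet",
--     "VP Fleet", "Director of Fleet Operations", "Procurement Manager", "Purchasing Manager",
--     "Operations Manager", "Director of Operations", "Logistics Manager", "Director of Logistics",
--     "Maintenance Manager", "Fleet Maintenance Manager", "Marketing Manager", "Director of Marketing"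
-- ]
--
-- _LOWERED = [kw.lower() for kw in TITLE_KEYWORDS]
-- _GENERIC = ("director", "vp", "vice", "head", "manager")
--
--
-- def _rank(p):
--     title = (p.get("title") or "").lower()
--     i = next((i for i, kw in enumerate(_LOWERED) if kw in title), None)
--     if i is not None:
--         return (0, i)
--     if any(x in title for x in _GENERIC):
--         return (1, 0)
--     return (2, 0)
--
--
-- def pick_decision_maker(people):
--     if not people:
--         return None
--     return min(people, key=_rank)
-- ===== Notes on version B (the rewrite author's own statement) =====
-- stated objective: simpler
-- what changed: Replaces A's keyword-outer nested scan plus a separate generic-term pass and a final fallback with one pass: compute a (tier, keyword-index) rank per person and return min(people, key=rank); stable min reproduces A's priority order and first-in-list tie-breaking.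
import Mathlib
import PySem

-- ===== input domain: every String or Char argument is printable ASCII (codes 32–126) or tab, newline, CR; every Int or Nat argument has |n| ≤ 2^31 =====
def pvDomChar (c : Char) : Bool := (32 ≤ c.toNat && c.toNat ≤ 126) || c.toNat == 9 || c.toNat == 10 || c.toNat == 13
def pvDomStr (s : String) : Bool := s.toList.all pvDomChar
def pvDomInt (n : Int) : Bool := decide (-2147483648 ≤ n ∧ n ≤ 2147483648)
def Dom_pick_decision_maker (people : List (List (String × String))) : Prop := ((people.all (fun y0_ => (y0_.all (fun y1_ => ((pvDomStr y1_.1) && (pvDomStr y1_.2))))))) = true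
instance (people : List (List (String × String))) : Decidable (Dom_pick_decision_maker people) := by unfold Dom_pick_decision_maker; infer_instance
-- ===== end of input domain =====

-- B replaces A's keyword-outer nested scan plus generic pass plus fallback by one stable
-- min over people keyed by a (tier, keyword-index) rank — objective: simpler decomposition.


-- ===== PORT A =====
def pvTITLE_KEYWORDS : List String := [
  "Fleet Manager", "Director of Fleet", "Fleet Operations Manager", "Head of Fleet",
  "VP Fleet", "Director of Fleet Operations", "Procurement Manager", "Purchasing Manager",
  "Operations Manager", "Director of Operations", "Logistics Manager", "Director of Logistics",
  "Maintenance Manager", "Fleet Maintenance Manager", "Marketing Manager", "Director of Marketing"]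

-- `(p.get("title") or "").lower()` — get? gives none for a missing key, `or ""` maps both
-- None and "" to "" (values are strings, so getD "" is exact); the same expression occurs in B.
def pvTitle (p : List (String × String)) : String :=
  PySem.Str.lower (((PySem.Dict.mk p).get? "title").getD "")

def pick_decision_maker (people : List (List (String × String))) : Option (List (String × String)) :=
  if people.isEmpty then none
  else
    match pvTITLE_KEYWORDS.findSome?
        (fun kw => people.find? (fun p => PySem.Str.isIn (PySem.Str.lower kw) (pvTitle p))) with
    | some p => some p
    | none =>
      match people.find? (fun p =>
          ["director", "vp", "vice", "head", "manager"].any (fun x => PySem.Str.isIn x (pvTitle p))) with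
      | some p => some p
      | none => people.head?

-- ===== PORT B =====
def pvLOWERED : List String := pvTITLE_KEYWORDS.map PySem.Str.lower
def pvGENERIC : List String := ["director", "vp", "vice", "head", "manager"]

-- rank(p) = (0, first matching keyword index) / (1, 0) generic term / (2, 0) nothing
def pvRank (p : List (String × String)) : Nat × Nat :=
  let title := pvTitle p
  match pvLOWERED.findIdx? (fun kw => PySem.Str.isIn kw title) with
  | some i => (0, i)
  | none => if pvGENERIC.any (fun x => PySem.Str.isIn x title) then (1, 0) else (2, 0)

def pick_decision_maker_alt (people : List (List (String × String))) : Option (List (String × String)) :=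
  if people.isEmpty then none
  else PySem.List.min2? people (fun p => (pvRank p).1) (fun p => (pvRank p).2)

-- ===== PRECONDITION & SPEC =====
def Spec_pick_decision_maker (people : List (List (String × String))) (out : Option (List (String × String))) : Prop := out = pick_decision_maker_alt people
instance (people : List (List (String × String))) (out : Option (List (String × String))) : Decidable (Spec_pick_decision_maker people out) := by unfold Spec_pick_decision_maker; infer_instance

-- ===== CLAIM (what is proved, stated in full; the proofs are below) =====
def Claim_equal_pick_decision_maker : Prop := ∀ (people : List (List (String × String))), Dom_pick_decision_maker people → Spec_pick_decision_maker people (pick_decision_maker people)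

-- ===== LEMMAS AND PROOFS =====

-- strict lexicographic < on the rank pairs (Python's tuple <)
def pvLtB (a b : Nat × Nat) : Bool := a.1 < b.1 || (a.1 == b.1 && a.2 < b.2)

lemma pvLtB_irrefl (a : Nat × Nat) : pvLtB a a = false := by simp [pvLtB]

lemma pvLtB_trans {a b c : Nat × Nat} (h1 : pvLtB a b = true) (h2 : pvLtB b c = true) :
    pvLtB a c = true := by simp [pvLtB] at *; omega

lemma pvLtB_nn_trans {a b c : Nat × Nat} (h1 : pvLtB a b = false) (h2 : pvLtB b c = false) :
    pvLtB a c = false := by simp [pvLtB] at *; omega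

-- the Bool condition inside PySem.List.min2? is exactly pvLtB
lemma pvCond_eq (a b : Nat × Nat) :
    (decide (a.1 < b.1) || (!decide (b.1 < a.1) && decide (a.2 < b.2))) = pvLtB a b := by
  rw [Bool.eq_iff_iff]
  simp only [pvLtB, Bool.or_eq_true, Bool.and_eq_true, Bool.not_eq_true',
    decide_eq_true_eq, decide_eq_false_iff_not, beq_iff_eq]
  omega

-- first-minimum-by-rank, structural recursion (spec-side helper)
def pvFM : List (List (String × String)) → Option (List (String × String))
  | [] => none
  | p :: t =>
    match pvFM t with
    | none => some p
    | some m => if pvLtB (pvRank m) (pvRank p) then some m else some p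

lemma pvFM_eq_none_iff (ps : List (List (String × String))) : pvFM ps = none ↔ ps = [] := by
  cases ps with
  | nil => simp [pvFM]
  | cons p t => simp only [pvFM]; cases pvFM t <;> (simp; try (split <;> simp))

def pvStep (acc : Option (List (String × String))) (x : List (String × String)) :
    Option (List (String × String)) :=
  match acc with
  | none => some x
  | some m => if pvLtB (pvRank x) (pvRank m) then some x else some m

def pvUpd : Option (List (String × String)) → List (String × String) → List (String × String)
  | none, m => m
  | some m', m => if pvLtB (pvRank m') (pvRank m) then m' else m

lemma pvGo (l : List (List (String × String))) :
    ∀ m, l.foldl pvStep (some m) = some (pvUpd (pvFM l) m) := by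
  induction l with
  | nil => intro m; rfl
  | cons x t ih =>
    intro m
    have hstep : pvStep (some m) x = some (if pvLtB (pvRank x) (pvRank m) then x else m) := by
      simp only [pvStep]; split <;> rfl
    rw [List.foldl_cons, hstep, ih]
    simp only [pvFM]
    cases hFM : pvFM t with
    | none => simp [pvUpd]
    | some m' =>
      by_cases h1 : pvLtB (pvRank x) (pvRank m) = true <;>
        by_cases h2 : pvLtB (pvRank m') (pvRank x) = true
      · have h3 : pvLtB (pvRank m') (pvRank m) = true := pvLtB_trans h2 h1
        simp [pvUpd, h1, h2, h3]
      · simp [pvUpd, h1, h2]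
      · simp [pvUpd, h1, h2]
      · have h3 : pvLtB (pvRank m') (pvRank m) = false :=
          pvLtB_nn_trans (Bool.eq_false_iff.mpr h2) (Bool.eq_false_iff.mpr h1)
        simp [pvUpd, h1, h2, h3]

lemma pvMin2_eq_pvFM (ps : List (List (String × String))) :
    PySem.List.min2? ps (fun p => (pvRank p).1) (fun p => (pvRank p).2) = pvFM ps := by
  have hfold : PySem.List.min2? ps (fun p => (pvRank p).1) (fun p => (pvRank p).2)
      = ps.foldl pvStep none := by
    unfold PySem.List.min2?
    congr 1
    funext acc x
    cases acc with
    | none => rfl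
    | some m => simp only [pvStep, pvCond_eq]
  rw [hfold]
  cases ps with
  | nil => rfl
  | cons p t =>
    have : pvStep none p = some p := rfl
    rw [List.foldl_cons, this, pvGo]
    simp only [pvFM]
    cases pvFM t with
    | none => rfl
    | some m' => simp only [pvUpd]; split <;> rfl

-- "m is the first element of ps with lexicographically minimal rank"
def pvIsFM (ps : List (List (String × String))) (m : List (String × String)) : Prop :=
  ∃ i, ∃ h : i < ps.length, ps[i] = m ∧
    (∀ j (hj : j < i), pvLtB (pvRank m) (pvRank (ps[j]'(by omega))) = true) ∧
    (∀ j (hj : j < ps.length), i ≤ j → pvLtB (pvRank ps[j]) (pvRank m) = false)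

lemma pvIsFM_unique {ps : List (List (String × String))} {m m' : List (String × String)}
    (h : pvIsFM ps m) (h' : pvIsFM ps m') : m = m' := by
  obtain ⟨i, hi, hm, hlt, hge⟩ := h
  obtain ⟨i', hi', hm', hlt', hge'⟩ := h'
  rcases Nat.lt_trichotomy i i' with hc | hc | hc
  · have h1 : pvLtB (pvRank m') (pvRank (ps[i]'(by omega))) = true := hlt' i hc
    have h2 : pvLtB (pvRank (ps[i']'hi')) (pvRank m) = false := hge i' hi' (by omega)
    rw [hm] at h1; rw [hm'] at h2
    rw [h1] at h2; cases h2
  · subst hc; rw [← hm, ← hm']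
  · have h1 : pvLtB (pvRank m) (pvRank (ps[i']'(by omega))) = true := hlt i' hc
    have h2 : pvLtB (pvRank (ps[i]'hi)) (pvRank m') = false := hge' i hi (by omega)
    rw [hm'] at h1; rw [hm] at h2
    rw [h1] at h2; cases h2

lemma pvFM_isFM {ps : List (List (String × String))} :
    ∀ {m : List (String × String)}, pvFM ps = some m → pvIsFM ps m := by
  induction ps with
  | nil => intro m h; cases h
  | cons p t ih =>
    intro m h
    simp only [pvFM] at h
    cases hFM : pvFM t with
    | none =>
      rw [hFM] at h
      injection h with h; subst h
      have ht : t = [] := (pvFM_eq_none_iff t).mp hFM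
      subst ht
      refine ⟨0, by simp, rfl, by intro j hj; exact absurd hj (by omega), ?_⟩
      intro j hj _
      have hj0 : j = 0 := by simp at hj; omega
      subst hj0
      simpa using pvLtB_irrefl (pvRank p)
    | some m' =>
      rw [hFM] at h
      dsimp only at h
      obtain ⟨i', hi', hm', hlt', hge'⟩ := ih hFM
      by_cases hc : pvLtB (pvRank m') (pvRank p) = true
      · rw [if_pos hc] at h
        injection h with h; subst h
        refine ⟨i' + 1, by simpa using hi', by simpa using hm', ?_, ?_⟩
        · intro j hj
          cases j with
          | zero => simpa using hc
          | succ k => simpa using hlt' k (by omega)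
        · intro j hj hij
          cases j with
          | zero => omega
          | succ k => simpa using hge' k (by simpa using hj) (by omega)
      · rw [if_neg hc] at h
        injection h with h; subst h
        have hcf : pvLtB (pvRank m') (pvRank p) = false := Bool.eq_false_iff.mpr hc
        refine ⟨0, by simp, rfl, by intro j hj; exact absurd hj (by omega), ?_⟩
        intro j hj _
        cases j with
        | zero => simpa using pvLtB_irrefl (pvRank p)
        | succ k =>
          simp only [List.getElem_cons_succ]
          by_cases hk : k < i'
          · by_cases hx : pvLtB (pvRank (t[k]'(by simpa using hj))) (pvRank p) = true
            · exact absurd (pvLtB_trans (hlt' k hk) hx) (by rw [hcf]; simp)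
            · exact Bool.eq_false_iff.mpr hx
          · exact pvLtB_nn_trans (hge' k (by simpa using hj) (by omega)) hcf

lemma pvRank_some {p : List (String × String)} {i : Nat}
    (h : pvLOWERED.findIdx? (fun kw => PySem.Str.isIn kw (pvTitle p)) = some i) :
    pvRank p = (0, i) := by
  simp only [pvRank]
  rw [h]

lemma pvRank_none {p : List (String × String)}
    (h : pvLOWERED.findIdx? (fun kw => PySem.Str.isIn kw (pvTitle p)) = none) :
    pvRank p = if pvGENERIC.any (fun x => PySem.Str.isIn x (pvTitle p)) then (1, 0) else (2, 0) := by
  simp only [pvRank]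
  rw [h]

lemma pvA_isFM {ps : List (List (String × String))} {m : List (String × String)}
    (h : pick_decision_maker ps = some m) : pvIsFM ps m := by
  unfold pick_decision_maker at h
  by_cases hemp : ps.isEmpty
  · rw [if_pos hemp] at h; cases h
  · rw [if_neg hemp] at h
    have hloop : pvTITLE_KEYWORDS.findSome?
        (fun kw => ps.find? (fun p => PySem.Str.isIn (PySem.Str.lower kw) (pvTitle p)))
        = pvLOWERED.findSome? (fun kw => ps.find? (fun p => PySem.Str.isIn kw (pvTitle p))) := by
      rw [show pvLOWERED = pvTITLE_KEYWORDS.map PySem.Str.lower from rfl, List.findSome?_map]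
      rfl
    rw [hloop] at h
    cases hFS : pvLOWERED.findSome? (fun kw => ps.find? (fun p => PySem.Str.isIn kw (pvTitle p))) with
    | some q =>
      rw [hFS] at h; dsimp only at h; injection h with h; subst h
      obtain ⟨l1, kwj, l2, hL, hfind, hnone⟩ := List.findSome?_eq_some_iff.mp hFS
      have hjlen : l1.length < pvLOWERED.length := by
        rw [hL]; simp [List.length_append]
      have hLj : pvLOWERED[l1.length]'hjlen = kwj := by
        simp only [hL]; rw [List.getElem_append_right (Nat.le_refl _)]; simp
      have hNoEarly : ∀ r ∈ ps, ∀ k (hk : k < l1.length),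
          PySem.Str.isIn (pvLOWERED[k]'(Nat.lt_trans hk hjlen)) (pvTitle r) = false := by
        intro r hr k hk
        have hmem : pvLOWERED[k]'(Nat.lt_trans hk hjlen) ∈ l1 := by
          simp only [hL]; rw [List.getElem_append_left hk]; exact List.getElem_mem _
        have := List.find?_eq_none.mp (hnone _ hmem) r hr
        simpa using this
      obtain ⟨hmatch, ip, hip, hpm, hbefore⟩ := List.find?_eq_some_iff_getElem.mp hfind
      have hrankm : pvRank q = (0, l1.length) := by
        apply pvRank_some
        apply List.findIdx?_eq_some_iff_getElem.mpr
        refine ⟨hjlen, by rw [hLj]; simpa using hmatch, ?_⟩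
        intro k hk
        have hqmem : q ∈ ps := hpm ▸ List.getElem_mem hip
        simpa using hNoEarly q hqmem k hk
      refine ⟨ip, hip, hpm, ?_, ?_⟩
      · intro jq hjq
        have hjq' : jq < ps.length := Nat.lt_trans hjq hip
        set r := ps[jq]'hjq' with hr
        have hrmem : r ∈ ps := List.getElem_mem _
        rw [hrankm]
        cases hq : pvLOWERED.findIdx? (fun kw => PySem.Str.isIn kw (pvTitle r)) with
        | none =>
          rw [pvRank_none hq]
          split <;> (rw [Bool.eq_iff_iff]; simp [pvLtB])
        | some iq =>
          rw [pvRank_some hq]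
          obtain ⟨hiq, hqmatch, hqmin⟩ := List.findIdx?_eq_some_iff_getElem.mp hq
          have hge : ¬ iq < l1.length := by
            intro hlt
            rw [hNoEarly r hrmem iq hlt] at hqmatch
            cases hqmatch
          have hne : iq ≠ l1.length := by
            intro heq
            have hb := hbefore jq hjq
            rw [← hr] at hb
            simp only [Bool.not_eq_true'] at hb
            simp only [heq] at hqmatch
            rw [hLj] at hqmatch
            exact (Bool.eq_false_iff.mp hb) hqmatch
          rw [Bool.eq_iff_iff]; simp [pvLtB]; omega
      · intro jq hjq hipjq
        set r := ps[jq]'hjq with hr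
        have hrmem : r ∈ ps := List.getElem_mem _
        rw [hrankm]
        cases hq : pvLOWERED.findIdx? (fun kw => PySem.Str.isIn kw (pvTitle r)) with
        | none =>
          rw [pvRank_none hq]
          split <;> (rw [Bool.eq_iff_iff]; simp [pvLtB])
        | some iq =>
          rw [pvRank_some hq]
          obtain ⟨hiq, hqmatch, hqmin⟩ := List.findIdx?_eq_some_iff_getElem.mp hq
          have hge : ¬ iq < l1.length := by
            intro hlt
            rw [hNoEarly r hrmem iq hlt] at hqmatch
            cases hqmatch
          rw [Bool.eq_iff_iff]; simp [pvLtB]; omega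
    | none =>
      rw [hFS] at h; dsimp only at h
      have hnoneAll := List.findSome?_eq_none_iff.mp hFS
      have hIdxNone : ∀ r ∈ ps, pvLOWERED.findIdx? (fun kw => PySem.Str.isIn kw (pvTitle r)) = none := by
        intro r hr
        apply List.findIdx?_eq_none_iff.mpr
        intro kw hkw
        have := List.find?_eq_none.mp (hnoneAll kw hkw) r hr
        simpa using this
      cases hG : ps.find? (fun p =>
          ["director", "vp", "vice", "head", "manager"].any (fun x => PySem.Str.isIn x (pvTitle p))) with
      | some q =>
        rw [hG] at h; dsimp only at h; injection h with h; subst h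
        obtain ⟨hmatch, ip, hip, hpm, hbefore⟩ := List.find?_eq_some_iff_getElem.mp hG
        have hqmem : q ∈ ps := hpm ▸ List.getElem_mem hip
        have hrankm : pvRank q = (1, 0) := by
          rw [pvRank_none (hIdxNone q hqmem)]
          rw [if_pos (by simpa [pvGENERIC] using hmatch)]
        refine ⟨ip, hip, hpm, ?_, ?_⟩
        · intro jq hjq
          have hjq' : jq < ps.length := Nat.lt_trans hjq hip
          set r := ps[jq]'hjq' with hr
          have hrmem : r ∈ ps := List.getElem_mem _
          have hnogen : pvGENERIC.any (fun x => PySem.Str.isIn x (pvTitle r)) = false := by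
            have := hbefore jq hjq
            rw [← hr] at this
            simpa [pvGENERIC] using this
          rw [hrankm, pvRank_none (hIdxNone r hrmem), if_neg (Bool.eq_false_iff.mp hnogen)]
          rw [Bool.eq_iff_iff]; simp [pvLtB]
        · intro jq hjq hipjq
          set r := ps[jq]'hjq with hr
          have hrmem : r ∈ ps := List.getElem_mem _
          rw [hrankm, pvRank_none (hIdxNone r hrmem)]
          split <;> (rw [Bool.eq_iff_iff]; simp [pvLtB])
      | none =>
        rw [hG] at h; dsimp only at h
        have hnogen := List.find?_eq_none.mp hG
        cases ps with
        | nil => simp at hemp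
        | cons p t =>
          injection h with h; subst h
          refine ⟨0, by simp, rfl, by intro j hj; exact absurd hj (by omega), ?_⟩
          intro j hj _
          set r := (p :: t)[j]'hj with hr
          have hrmem : r ∈ p :: t := List.getElem_mem _
          have hpmem : p ∈ p :: t := by simp
          have h1 : pvRank r = (2, 0) := by
            rw [pvRank_none (hIdxNone r hrmem)]
            rw [if_neg (by simpa [pvGENERIC] using hnogen r hrmem)]
          have h2 : pvRank p = (2, 0) := by
            rw [pvRank_none (hIdxNone p hpmem)]
            rw [if_neg (by simpa [pvGENERIC] using hnogen p hpmem)]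
          rw [h1, h2]
          simp [pvLtB]

-- ===== VERDICT (by name: the statement is the Claim_ definition above) =====
theorem pick_decision_maker_spec : Claim_equal_pick_decision_maker := by
  intro people _
  unfold Spec_pick_decision_maker
  cases hps : people with
  | nil => simp [pick_decision_maker, pick_decision_maker_alt]
  | cons p t =>
    subst hps
    have hne : (p :: t : List (List (String × String))) ≠ [] := by simp
    have hB : pick_decision_maker_alt (p :: t) = pvFM (p :: t) := by
      simp only [pick_decision_maker_alt, List.isEmpty_cons]
      exact pvMin2_eq_pvFM _
    obtain ⟨mB, hmB⟩ : ∃ mB, pvFM (p :: t) = some mB := by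
      cases hFM : pvFM (p :: t) with
      | none => exact absurd ((pvFM_eq_none_iff _).mp hFM) hne
      | some m => exact ⟨m, rfl⟩
    obtain ⟨mA, hmA⟩ : ∃ mA, pick_decision_maker (p :: t) = some mA := by
      unfold pick_decision_maker
      simp only [List.isEmpty_cons, Bool.false_eq_true, if_false]
      cases pvTITLE_KEYWORDS.findSome?
          (fun kw => (p :: t).find? (fun q => PySem.Str.isIn (PySem.Str.lower kw) (pvTitle q))) with
      | some q => exact ⟨q, rfl⟩
      | none =>
        cases (p :: t).find? (fun q =>
            ["director", "vp", "vice", "head", "manager"].any (fun x => PySem.Str.isIn x (pvTitle q))) with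
        | some q => exact ⟨q, rfl⟩
        | none => exact ⟨p, rfl⟩
    rw [hmA, hB, hmB]
    exact congrArg some (pvIsFM_unique (pvA_isFM hmA) (pvFM_isFM hmB))
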